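-- pv_equiv track=rewrite | github.com/ukuleletrip/gcj | 2018_q/SavingUniverseAgain.py | count_
-- ===== SOURCE A (Python) =====
-- def count_(P):
--     tbl = {}
--     count_c = 0
--     for op in P:
--         if op == 'S':
--             if count_c not in tbl:
--                 tbl[count_c] = 0
--             tbl[count_c] += 1
--         elif op == 'C':
--             count_c += 1
--     return tbl
-- ===== SOURCE B (Python) =====
-- def count_(P):
--     # Partition P at 'C': segment i holds the characters fired after exactly i charges.
--     return {i: c for i, seg in enumerate(P.split('C')) if (c := seg.count('S'))}
-- ===== Notes on version B (the rewrite author's own statement) =====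
-- stated objective: faster
-- what changed: Replaces A's character-by-character loop with a running charge counter and incremental dict updates by a single partition at 'C' (str.split), so each charge level is a segment whose 'S' occurrences are counted by str.count, keeping only the nonzero counts.
import Mathlib
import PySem

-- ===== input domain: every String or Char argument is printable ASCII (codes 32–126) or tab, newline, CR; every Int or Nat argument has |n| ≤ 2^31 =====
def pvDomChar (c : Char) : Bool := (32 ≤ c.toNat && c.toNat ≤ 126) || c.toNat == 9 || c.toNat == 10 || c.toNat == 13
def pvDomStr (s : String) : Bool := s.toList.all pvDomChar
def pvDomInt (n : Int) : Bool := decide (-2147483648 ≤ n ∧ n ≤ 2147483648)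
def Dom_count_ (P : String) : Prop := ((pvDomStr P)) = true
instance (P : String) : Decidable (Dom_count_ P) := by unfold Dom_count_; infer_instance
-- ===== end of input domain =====

-- B replaces A's running charge counter with a single split of P at 'C' (segment index = charge level) and per-segment 'S' counts: same dict; a timing run measured B faster (bulk split/count instead of a per-character loop).

-- ===== PORT A =====
-- running loop over the characters; state = (tbl, count_c).
-- tbl[count_c] += 1 is Dict.modify with default 0 (exact here: the key was just ensured present).
def count_ (P : String) : List (Int × Int) :=
  ((P.toList.foldl
      (fun (st : PySem.Dict Int Int × Int) op =>
        if op = 'S' then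
          let tbl := if st.1.contains st.2 = false then st.1.insert st.2 0 else st.1
          (tbl.modify st.2 0 (fun v => v + 1), st.2)
        else if op = 'C' then (st.1, st.2 + 1)
        else st)
      (PySem.Dict.empty, 0)).1).items

-- ===== PORT B =====
-- P.split('C') = PySem.Chars.splitOn, seg.count('S') = PySem.Chars.count; the dict
-- comprehension is a fold inserting only the nonzero counts.
def count__alt (P : String) : List (Int × Int) :=
  (((PySem.List.enumerate (PySem.Chars.splitOn P.toList ['C'])).foldl
      (fun (d : PySem.Dict Int Int) p =>
        let c := PySem.Chars.count p.2 ['S']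
        if c ≠ 0 then d.insert p.1 (c : Int) else d)
      PySem.Dict.empty)).items

-- ===== PRECONDITION & SPEC =====
def Spec_count_ (P : String) (out : List (Int × Int)) : Prop := out = count__alt P
instance (P : String) (out : List (Int × Int)) : Decidable (Spec_count_ P out) := by unfold Spec_count_; infer_instance

-- ===== CLAIM (what is proved, stated in full; the proofs are below) =====
def Claim_equal_count_ : Prop := ∀ (P : String), Dom_count_ P → Spec_count_ P (count_ P)

-- ===== LEMMAS AND PROOFS =====

-- structural model of P.split('C')
def mySplit : List Char → List Char → List (List Char)
  | pre, [] => [pre]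
  | pre, c :: r => if c = 'C' then pre :: mySplit [] r else mySplit (pre ++ [c]) r

-- the (level, shots) entry contributed by one segment, dropped when empty
def tacc (c : Int) (acc : Nat) : List (Int × Int) :=
  if acc = 0 then [] else [(c, (acc : Int))]

-- entries contributed by a list of segments starting at level c
def spec2 : Int → List (List Char) → List (Int × Int)
  | _, [] => []
  | c, s :: r => tacc c (s.count 'S') ++ spec2 (c + 1) r

-- entries produced by A's loop from level c with acc shots already seen at level c
def spec : Int → Nat → List Char → List (Int × Int)
  | c, acc, [] => tacc c acc
  | c, acc, op :: r =>
    if op = 'S' then spec c (acc + 1) r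
    else if op = 'C' then tacc c acc ++ spec (c + 1) 0 r
    else spec c acc r

theorem countGo_eq (sub : List Char) (h1 : sub = ['S']) :
    ∀ (fuel : Nat) (l : List Char) (acc : Nat), l.length ≤ fuel →
      PySem.Chars.count.go sub fuel l acc = acc + l.count 'S' := by
  subst h1
  intro fuel
  induction fuel with
  | zero =>
    intro l acc h
    have : l = [] := by cases l <;> simp_all
    subst this; simp [PySem.Chars.count.go]
  | succ f ih =>
    intro l acc h
    cases l with
    | nil => simp [PySem.Chars.count.go]
    | cons x r =>
      have hl : r.length ≤ f := by simpa using h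
      by_cases hx : x = 'S'
      · subst hx
        simp only [PySem.Chars.count.go]
        simp only [List.isPrefixOf, beq_self_eq_true, Bool.and_self]
        rw [if_pos trivial, show List.drop ['S'].length ('S' :: r) = r from rfl,
          ih r (acc + 1) hl]
        simp; omega
      · have hpre : (['S'].isPrefixOf (x :: r)) = false := by
          simp [List.isPrefixOf]; exact fun hh => (hx hh.symm).elim
        simp only [PySem.Chars.count.go]
        rw [hpre]
        simp only [Bool.false_eq_true, if_false]
        rw [ih r acc hl]
        simp [hx]

theorem count_singleton_S (s : List Char) :
    PySem.Chars.count s ['S'] = s.count 'S' := by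
  simp only [PySem.Chars.count, List.isEmpty_cons, Bool.false_eq_true, if_false]
  simpa using countGo_eq ['S'] rfl s.length s 0 le_rfl

theorem splitGo_eq :
    ∀ (fuel : Nat) (l cur : List Char) (acc : List (List Char)), l.length < fuel →
      PySem.Chars.splitOn.go ['C'] fuel l cur acc = acc.reverse ++ mySplit cur.reverse l := by
  intro fuel
  induction fuel with
  | zero => intro l cur acc h; omega
  | succ f ih =>
    intro l cur acc h
    cases l with
    | nil => simp [PySem.Chars.splitOn.go, mySplit]
    | cons c r =>
      have hl : r.length < f := by simpa using Nat.lt_of_succ_lt_succ (by simpa using h)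
      by_cases hc : c = 'C'
      · subst hc
        simp only [PySem.Chars.splitOn.go]
        simp only [List.isPrefixOf, beq_self_eq_true, Bool.and_self]
        rw [if_pos trivial, show List.drop ['C'].length ('C' :: r) = r from rfl,
          ih r [] (cur.reverse :: acc) hl]
        simp [mySplit]
      · have hpre : (['C'].isPrefixOf (c :: r)) = false := by
          simp [List.isPrefixOf]; exact fun hh => (hc hh.symm).elim
        simp only [PySem.Chars.splitOn.go]
        rw [hpre]
        simp only [Bool.false_eq_true, if_false]
        rw [ih r (c :: cur) acc hl]
        simp [mySplit, hc]

theorem splitOn_eq_mySplit (l : List Char) :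
    PySem.Chars.splitOn l ['C'] = mySplit [] l := by
  simpa using splitGo_eq (l.length + 1) l [] [] (by omega)

-- spec with the first segment's already-seen part made explicit equals spec2 of the split
theorem spec_eq_spec2 :
    ∀ (l pre : List Char) (c : Int),
      spec c (pre.count 'S') l = spec2 c (mySplit pre l) := by
  intro l
  induction l with
  | nil => intro pre c; simp [spec, mySplit, spec2]
  | cons x r ih =>
    intro pre c
    by_cases hS : x = 'S'
    · subst hS
      have h1 : mySplit pre ('S' :: r) = mySplit (pre ++ ['S']) r := by
        simp [mySplit]
      rw [h1, ← ih (pre ++ ['S']) c]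
      simp [spec, List.count_append]
    · by_cases hC : x = 'C'
      · subst hC
        have h1 : mySplit pre ('C' :: r) = pre :: mySplit [] r := by simp [mySplit]
        rw [h1]
        have h2 := ih [] (c + 1)
        simp only [List.count_nil] at h2
        simp [spec, spec2, ← h2]
      · have h1 : mySplit pre (x :: r) = mySplit (pre ++ [x]) r := by
          simp [mySplit, hC]
        rw [h1, ← ih (pre ++ [x]) c]
        simp [spec, hS, hC, List.count_append]

-- assoc-list facts used to run A's dict operations with an untouched prefix e (keys < c)
theorem contains_mk_append_of_lt (e : List (Int × Int)) (rest : List (Int × Int)) (c : Int)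
    (h : ∀ p ∈ e, p.1 < c) :
    (PySem.Dict.mk (e ++ rest) : PySem.Dict Int Int).contains c
      = (PySem.Dict.mk rest : PySem.Dict Int Int).contains c := by
  have he : e.any (fun p => p.1 == c) = false := by
    simp only [List.any_eq_false]
    intro p hp
    have := h p hp
    simp; omega
  simp only [PySem.Dict.contains, List.any_append, he, Bool.false_or]

theorem insert_mk_append_last (e : List (Int × Int)) (c v w : Int)
    (h : ∀ p ∈ e, p.1 < c) :
    (PySem.Dict.mk (e ++ [(c, v)]) : PySem.Dict Int Int).insert c w
      = PySem.Dict.mk (e ++ [(c, w)]) := by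
  have hcont : (PySem.Dict.mk (e ++ [(c, v)]) : PySem.Dict Int Int).contains c = true := by
    rw [contains_mk_append_of_lt e [(c, v)] c h]
    simp [PySem.Dict.contains]
  simp only [PySem.Dict.insert, hcont, if_pos]
  congr 1
  rw [List.map_append]
  congr 1
  · calc List.map (fun p => if (p.1 == c) = true then (c, w) else p) e
        = List.map id e := by
          apply List.map_congr_left
          intro p hp
          have hlt := h p hp
          have hne : (p.1 == c) = false := by simp; omega
          simp [hne]
      _ = e := List.map_id e
  · simp

theorem getD_mk_append_last (e : List (Int × Int)) (c v : Int)
    (h : ∀ p ∈ e, p.1 < c) :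
    (PySem.Dict.mk (e ++ [(c, v)]) : PySem.Dict Int Int).getD c 0 = v := by
  simp only [PySem.Dict.getD, PySem.Dict.get?, List.find?_append]
  have : e.find? (fun p => p.1 == c) = none := by
    simp only [List.find?_eq_none]
    intro p hp
    have := h p hp
    simp; omega
  simp [this, List.find?]

-- A's loop, with an already-finished prefix e of entries (all at levels < c) and acc
-- shots seen so far at the current level c, produces e ++ spec c acc
theorem aLoop_eq :
    ∀ (l : List Char) (e : List (Int × Int)) (c : Int) (acc : Nat),
      (∀ p ∈ e, p.1 < c) →
      ((l.foldl
          (fun (st : PySem.Dict Int Int × Int) op =>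
            if op = 'S' then
              let tbl := if st.1.contains st.2 = false then st.1.insert st.2 0 else st.1
              (tbl.modify st.2 0 (fun v => v + 1), st.2)
            else if op = 'C' then (st.1, st.2 + 1)
            else st)
          (PySem.Dict.mk (e ++ tacc c acc), c)).1).items = e ++ spec c acc l := by
  intro l
  induction l with
  | nil =>
    intro e c acc h
    simp [spec, tacc]
  | cons op r ih =>
    intro e c acc h
    by_cases hS : op = 'S'
    · subst hS
      simp only [List.foldl_cons, if_pos]
      have hstep :
          (let tbl := if (PySem.Dict.mk (e ++ tacc c acc) : PySem.Dict Int Int).contains c = false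
                      then (PySem.Dict.mk (e ++ tacc c acc) : PySem.Dict Int Int).insert c 0
                      else PySem.Dict.mk (e ++ tacc c acc);
            tbl.modify c 0 (fun v => v + 1))
            = PySem.Dict.mk (e ++ tacc c (acc + 1)) := by
        by_cases hacc : acc = 0
        · subst hacc
          have hcont : (PySem.Dict.mk (e ++ tacc c 0) : PySem.Dict Int Int).contains c = false := by
            rw [show tacc c 0 = [] from rfl, contains_mk_append_of_lt e [] c h]
            simp [PySem.Dict.contains]
          have hins : (PySem.Dict.mk (e ++ tacc c 0) : PySem.Dict Int Int).insert c 0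
              = PySem.Dict.mk (e ++ [(c, 0)]) := by
            simp only [PySem.Dict.insert, hcont, Bool.false_eq_true, if_false]
            simp [tacc]
          simp only [hcont, if_pos, hins, PySem.Dict.modify]
          rw [getD_mk_append_last e c 0 h, insert_mk_append_last e c 0 (0 + 1) h]
          simp [tacc]
        · rw [show tacc c acc = [(c, (acc : Int))] by simp [tacc, hacc]]
          have hcont : (PySem.Dict.mk (e ++ [(c, (acc : Int))]) : PySem.Dict Int Int).contains c = true := by
            rw [contains_mk_append_of_lt e [(c, (acc : Int))] c h]
            simp [PySem.Dict.contains]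
          rw [if_neg (by simp [hcont])]
          simp only [PySem.Dict.modify]
          rw [getD_mk_append_last e c (acc : Int) h,
            insert_mk_append_last e c (acc : Int) ((acc : Int) + 1) h]
          simp [tacc]
      simp only at hstep
      rw [hstep, ih e c (acc + 1) h]
      simp [spec]
    · by_cases hC : op = 'C'
      · subst hC
        simp only [List.foldl_cons, hS, if_false, if_pos]
        have h2 : ∀ p ∈ e ++ tacc c acc, p.1 < c + 1 := by
          intro p hp
          rcases List.mem_append.mp hp with h1 | h1
          · exact lt_trans (h p h1) (by omega)
          · simp only [tacc] at h1
            split at h1 <;> simp_all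
        have := ih (e ++ tacc c acc) (c + 1) 0 h2
        rw [show tacc (c + 1) 0 = [] from rfl, List.append_nil] at this
        rw [this]
        simp [spec, hS]
      · simp only [List.foldl_cons, if_neg hS, if_neg hC]
        rw [ih e c acc h]
        simp [spec, hS, hC]

-- B's fold over the enumerated segments, from a dict whose keys are all < i
theorem bLoop_eq :
    ∀ (segs : List (List Char)) (d : PySem.Dict Int Int) (i : Int),
      (∀ p ∈ d.items, p.1 < i) →
      ((PySem.List.enumerate segs i).foldl
          (fun (d : PySem.Dict Int Int) p =>
            let c := PySem.Chars.count p.2 ['S']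
            if c ≠ 0 then d.insert p.1 (c : Int) else d)
          d).items = d.items ++ spec2 i segs := by
  intro segs
  induction segs with
  | nil => intro d i h; simp [PySem.List.enumerate_nil, spec2]
  | cons s r ih =>
    intro d i h
    rw [PySem.List.enumerate_cons, List.foldl_cons]
    by_cases hz : s.count 'S' = 0
    · have hstep : (let c := PySem.Chars.count (i, s).2 ['S']
            if c ≠ 0 then d.insert (i, s).1 (c : Int) else d) = d := by
        simp [count_singleton_S, hz]
      rw [hstep, ih d (i + 1) (fun p hp => lt_trans (h p hp) (by omega))]
      simp [spec2, tacc, hz]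
    · have hcont : d.contains i = false := by
        simp only [PySem.Dict.contains, List.any_eq_false]
        intro p hp
        have := h p hp
        simp; omega
      have hins : (d.insert i ((s.count 'S' : Nat) : Int)).items
          = d.items ++ [(i, ((s.count 'S' : Nat) : Int))] :=
        PySem.Dict.items_insert_of_not_contains d _ hcont
      have hstep : (let c := PySem.Chars.count (i, s).2 ['S']
            if c ≠ 0 then d.insert (i, s).1 (c : Int) else d)
          = d.insert i ((s.count 'S' : Nat) : Int) := by
        simp [count_singleton_S, hz]
      rw [hstep, ih (d.insert i ((s.count 'S' : Nat) : Int)) (i + 1)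
        (by
          intro p hp
          rw [hins] at hp
          rcases List.mem_append.mp hp with h1 | h1
          · exact lt_trans (h p h1) (by omega)
          · rcases List.mem_singleton.mp h1 with rfl
            simp)]
      rw [hins]
      simp [spec2, tacc, hz]

-- ===== VERDICT (by name: the statement is the Claim_ definition above) =====
theorem count__spec : Claim_equal_count_ := by
  intro P _
  unfold Spec_count_ count_ count__alt
  have hB := bLoop_eq (PySem.Chars.splitOn P.toList ['C']) PySem.Dict.empty 0
    (by simp [PySem.Dict.empty])
  rw [hB]
  have hA := aLoop_eq P.toList [] 0 0 (by simp)
  rw [show tacc 0 0 = [] from rfl] at hA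
  simp only [List.append_nil, List.nil_append] at hA
  rw [show (PySem.Dict.empty : PySem.Dict Int Int) = PySem.Dict.mk [] from rfl, hA]
  simp only [List.nil_append]
  rw [splitOn_eq_mySplit]
  have := spec_eq_spec2 P.toList [] 0
  simpa using this
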